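-- pv_equiv track=rewrite | github.com/nikunjvisavadia/100daycodingchallenge | Day89.py | max_steps
-- ===== SOURCE A (Python) =====
-- def max_steps(n, k, c, numbers):
--     numbers.sort(reverse=True)
--     steps = 0
--
--     while numbers:
--         selected = numbers[:k]
--         numbers = numbers[k:]
--         steps += 1
--
--         for i in range(1, len(selected)):
--             if selected[i] < selected[i - 1] * c:
--                 return steps - 1
--
--     return steps
-- ===== SOURCE B (Python) =====
-- def max_steps(n, k, c, numbers):
--     numbers.sort(reverse=True)
--     if not numbers:
--         return 0
--     for j in range(1, len(numbers)):
--         if j % k != 0 and numbers[j] < numbers[j - 1] * c: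
--             return j // k
--     return (len(numbers) + k - 1) // k
-- ===== Notes on version B (the rewrite author's own statement) =====
-- stated objective: simpler
-- what changed: Replaces the chunked while-loop with repeated list slicing and a running steps counter by a single flat index scan over the sorted list (chunk number recovered as j//k, total chunks as a ceiling formula), no slicing and no counter.
-- outside the precondition, e.g. on max_steps(0, -1, 1, [2, 1, 0]): A returns 0, B returns -1; on max_steps(0, 0, 1, [2, 1]): A does not finish within the time limit, B raises ZeroDivisionError
import Mathlib
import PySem

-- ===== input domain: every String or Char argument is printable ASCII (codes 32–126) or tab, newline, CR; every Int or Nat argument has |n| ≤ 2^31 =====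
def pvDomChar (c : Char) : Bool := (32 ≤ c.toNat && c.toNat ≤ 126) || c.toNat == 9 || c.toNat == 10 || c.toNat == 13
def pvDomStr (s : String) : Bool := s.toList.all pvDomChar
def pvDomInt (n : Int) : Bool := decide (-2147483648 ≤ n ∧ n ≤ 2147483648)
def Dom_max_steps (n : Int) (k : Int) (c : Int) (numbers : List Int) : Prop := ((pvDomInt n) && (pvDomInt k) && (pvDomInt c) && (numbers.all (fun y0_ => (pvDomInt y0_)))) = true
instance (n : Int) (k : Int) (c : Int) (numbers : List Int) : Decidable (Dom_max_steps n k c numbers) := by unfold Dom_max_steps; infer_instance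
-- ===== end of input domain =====

-- B replaces A's chunked while-loop (slice off k elements, keep a steps counter, inner indexed scan)
-- by one flat index scan over the sorted list, recovering the chunk number as j // k and the total
-- chunk count as a ceiling formula; objective: simpler.  Both A and B sort `numbers` in place
-- (same observable mutation); the equivalence proved here is about the return value.

-- ===== PORT A =====
-- inner 'for i in range(1, len(selected)): if selected[i] < selected[i-1]*c: return …'
-- as the structural scan over adjacent pairs (the return value does not depend on which i fires,
-- only on whether some i fires)
def pyChunkBad (c : Int) : List Int → Bool
  | a :: b :: rest => if b < a * c then true else pyChunkBad c (b :: rest)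
  | _ => false

-- the while-loop; fuel only makes it total (A diverges when k ≤ 0 and the list is nonempty,
-- which Pre_ excludes; under Pre_ the fuel is never exhausted)
def max_steps_loop (k c : Int) : Nat → List Int → Int → Int
  | 0, _, steps => steps
  | fuel + 1, numbers, steps =>
    if numbers = [] then steps
    else
      let selected := PySem.List.slice numbers none (some k)
      let rest := PySem.List.slice numbers (some k) none
      if pyChunkBad c selected then (steps + 1) - 1
      else max_steps_loop k c fuel rest (steps + 1)

def max_steps (n : Int) (k : Int) (c : Int) (numbers : List Int) : Int :=
  max_steps_loop k c (numbers.length + 1) (PySem.List.sorted numbers (fun x => x) true) 0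

-- ===== PORT B =====
-- 'for j in range(1, len(s)): if j % k != 0 and s[j] < s[j-1]*c: return j // k'
-- as a scan over adjacent pairs carrying the index j
def altScan (k c : Int) : Int → List Int → Option Int
  | j, a :: b :: rest =>
    if PySem.Int.mod j k ≠ 0 ∧ b < a * c then some (PySem.Int.floordiv j k)
    else altScan k c (j + 1) (b :: rest)
  | _, _ => none

def max_steps_alt (n : Int) (k : Int) (c : Int) (numbers : List Int) : Int :=
  let s := PySem.List.sorted numbers (fun x => x) true
  if s = [] then 0
  else
    match altScan k c 1 s with
    | some r => r
    | none => PySem.Int.floordiv ((s.length : Int) + k - 1) k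

-- ===== PRECONDITION & SPEC =====
-- Pre_ excludes nonempty lists with non-positive chunk size k (outside the task's natural domain):
-- there A's slicing never consumes the list, so A diverges unless an early chunk happens to fail,
-- in which case its value is an accident of negative slicing; B raises ZeroDivisionError (k = 0)
-- or returns its ceiling formula's value (k < 0) there.
def Pre_max_steps (n : Int) (k : Int) (c : Int) (numbers : List Int) : Prop :=
  numbers = [] ∨ 1 ≤ k
instance (n : Int) (k : Int) (c : Int) (numbers : List Int) : Decidable (Pre_max_steps n k c numbers) := by unfold Pre_max_steps; infer_instance

def pvWitness_max_steps : Int × Int × Int × List Int := (6, 2, 1, [5, 9, 3, 7, 1, 2])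

def Spec_max_steps (n : Int) (k : Int) (c : Int) (numbers : List Int) (out : Int) : Prop := out = max_steps_alt n k c numbers
instance (n : Int) (k : Int) (c : Int) (numbers : List Int) (out : Int) : Decidable (Spec_max_steps n k c numbers out) := by unfold Spec_max_steps; infer_instance

-- ===== CLAIM (what is proved, stated in full; the proofs are below) =====
def Claim_equal_max_steps : Prop := ∀ (n : Int) (k : Int) (c : Int) (numbers : List Int), Dom_max_steps n k c numbers → Pre_max_steps n k c numbers → Spec_max_steps n k c numbers (max_steps n k c numbers)

-- ===== LEMMAS AND PROOFS =====

-- B's result for a given (already sorted) list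
def bres (k c : Int) (s : List Int) : Int :=
  match altScan k c 1 s with
  | some r => r
  | none => PySem.Int.floordiv ((s.length : Int) + k - 1) k

lemma pyChunkBad_short (c : Int) (l : List Int) (h : l.length ≤ 1) : pyChunkBad c l = false := by
  match l, h with
  | [], _ => rfl
  | [a], _ => rfl

lemma floordiv_zero_of_lt (k j : Int) (h0 : 0 ≤ j) (h1 : j < k) : PySem.Int.floordiv j k = 0 := by
  have hk : 0 < k := lt_of_le_of_lt h0 h1
  rw [PySem.Int.floordiv_eq_iff_of_pos hk]
  omega

lemma mod_self_zero (k : Int) (hk : 1 ≤ k) : PySem.Int.mod k k = 0 := by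
  rw [PySem.Int.mod_eq_zero_iff_dvd]

lemma mod_pos_lt (k j : Int) (h0 : 0 < j) (h1 : j < k) : PySem.Int.mod j k = j := by
  rw [PySem.Int.mod_eq_emod_of_pos (lt_trans h0 h1)]
  exact Int.emod_eq_of_lt (by omega) h1

-- the shift lemma: moving the start index by one whole chunk adds 1 to the reported chunk number
lemma altScan_shift (k c : Int) (hk : 1 ≤ k) :
    ∀ (l : List Int) (j : Int),
      altScan k c (j + k) l = Option.map (· + 1) (altScan k c j l) := by
  intro l
  induction l with
  | nil => intro j; rfl
  | cons a t ih =>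
    intro j
    match t with
    | [] => rfl
    | b :: t' =>
      have hmod : PySem.Int.mod (j + k) k = PySem.Int.mod j k := by
        rw [PySem.Int.mod_eq_emod_of_pos (show (0:Int) < k by omega),
            PySem.Int.mod_eq_emod_of_pos (show (0:Int) < k by omega)]
        exact Eq.symm Int.emod_eq_add_self_emod
      have hdiv : PySem.Int.floordiv (j + k) k = PySem.Int.floordiv j k + 1 := by
        rw [PySem.Int.floordiv_eq_ediv_of_pos (show (0:Int) < k by omega),
            PySem.Int.floordiv_eq_ediv_of_pos (show (0:Int) < k by omega)]
        rw [show j + k = j + 1 * k by ring, Int.add_mul_ediv_right j 1 (show k ≠ 0 by omega)]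
      simp only [altScan, hmod, hdiv]
      by_cases hcond : PySem.Int.mod j k ≠ 0 ∧ b < a * c
      · simp [hcond]
      · simp only [if_neg hcond]
        have := ih (j + 1)
        rw [show j + k + 1 = j + 1 + k by ring]
        exact this

-- a bad pair inside the first chunk: the flat scan reports chunk 0
lemma altScan_first_bad (k c : Int) (hk : 1 ≤ k) :
    ∀ (m : Nat) (l : List Int) (j : Int), 1 ≤ j → j + m = k →
      pyChunkBad c (l.take (m + 1)) = true → altScan k c j l = some 0 := by
  intro m
  induction m with
  | zero =>
    intro l j _ _ hbad
    have := pyChunkBad_short c (l.take 1) (by simp)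
    rw [this] at hbad; exact absurd hbad (by simp)
  | succ m ih =>
    intro l j hj hjm hbad
    match l with
    | [] => simp [pyChunkBad] at hbad
    | [a] => simp [pyChunkBad] at hbad
    | a :: b :: t =>
      have htake : (a :: b :: t).take (m + 1 + 1) = a :: b :: t.take m := by simp
      rw [htake] at hbad
      by_cases hb : b < a * c
      · have hjlt : j < k := by push_cast at hjm; omega
        have hmod : PySem.Int.mod j k = j := mod_pos_lt k j (by omega) hjlt
        simp only [altScan, hmod]
        rw [if_pos ⟨by omega, hb⟩, floordiv_zero_of_lt k j (by omega) hjlt]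
      · have hbad' : pyChunkBad c ((b :: t).take (m + 1)) = true := by
          simpa [pyChunkBad, hb] using hbad
        have := ih (b :: t) (j + 1) (by omega) (by push_cast at hjm ⊢; omega) hbad'
        simp only [altScan]
        rw [if_neg (by simp [hb])]
        exact this

-- a good first chunk: the flat scan walks past it (the boundary index is skipped by j % k == 0)
lemma altScan_skip_chunk (k c : Int) (hk : 1 ≤ k) :
    ∀ (m : Nat) (l : List Int) (j : Int), 1 ≤ j → j + m = k →
      pyChunkBad c (l.take (m + 1)) = false →
      altScan k c j l = altScan k c (j + m + 1) (l.drop (m + 1)) := by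
  intro m
  induction m with
  | zero =>
    intro l j hj hjm _
    match l with
    | [] => rfl
    | [a] => rfl
    | a :: b :: t =>
      have hjk : j = k := by push_cast at hjm; omega
      simp only [altScan]
      rw [if_neg (by simp [hjk, mod_self_zero k hk])]
      simp
  | succ m ih =>
    intro l j hj hjm hgood
    match l with
    | [] => rfl
    | [a] => rfl
    | a :: b :: t =>
      have htake : (a :: b :: t).take (m + 1 + 1) = a :: b :: t.take m := by simp
      rw [htake] at hgood
      have hb : ¬ b < a * c := by
        intro hb; simp [pyChunkBad, hb] at hgood
      have hgood' : pyChunkBad c ((b :: t).take (m + 1)) = false := by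
        simpa [pyChunkBad, hb] using hgood
      have := ih (b :: t) (j + 1) (by omega) (by push_cast at hjm ⊢; omega) hgood'
      simp only [altScan]
      rw [if_neg (by simp [hb]), this]
      have : j + 1 + (m : Int) + 1 = j + (m + 1 : Nat) + 1 := by push_cast; ring
      rw [this]
      simp

lemma bres_nil (k c : Int) (hk : 1 ≤ k) : bres k c [] = 0 := by
  show PySem.Int.floordiv ((([] : List Int).length : Int) + k - 1) k = 0
  simp only [List.length_nil, Int.natCast_zero]
  exact floordiv_zero_of_lt k (0 + k - 1) (by omega) (by omega)

-- one chunk of A's loop corresponds to '1 +' on B's flat-scan result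
lemma bres_step (k c : Int) (hk : 1 ≤ k) (s : List Int) (hs : s ≠ []) :
    bres k c s = (if pyChunkBad c (s.take k.toNat) then 0 else 1 + bres k c (s.drop k.toNat)) := by
  have hkn : 1 ≤ k.toNat := by omega
  have hm : k.toNat - 1 + 1 = k.toNat := by omega
  by_cases hbad : pyChunkBad c (s.take k.toNat) = true
  · rw [if_pos hbad]
    have := altScan_first_bad k c hk (k.toNat - 1) s 1 (by omega) (by omega)
      (by rw [hm]; exact hbad)
    simp [bres, this]
  · rw [if_neg hbad]
    have hgood : pyChunkBad c (s.take (k.toNat - 1 + 1)) = false := by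
      rw [hm]; simpa using hbad
    have hskip := altScan_skip_chunk k c hk (k.toNat - 1) s 1 (by omega) (by omega) hgood
    rw [hm] at hskip
    have hidx : (1 : Int) + ((k.toNat - 1 : Nat) : Int) + 1 = 1 + k := by omega
    rw [hidx] at hskip
    have hshift := altScan_shift k c hk (s.drop k.toNat) 1
    unfold bres
    rw [hskip, hshift]
    cases hinner : altScan k c 1 (s.drop k.toNat) with
    | some r =>
      simp only [Option.map_some]
      omega
    | none =>
      simp only [Option.map_none]
      -- ceiling arithmetic: ⌈len/k⌉ = 1 + ⌈(len-k)/k⌉ (clamped at 0)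
      have hlen : (s.drop k.toNat).length = s.length - k.toNat := by simp
      have hlpos : 0 < s.length := List.length_pos_of_ne_nil hs
      by_cases hle : s.length ≤ k.toNat
      · have hdl : (s.drop k.toNat).length = 0 := by omega
        rw [hdl]
        have h1 : PySem.Int.floordiv ((s.length : Int) + k - 1) k = 1 := by
          rw [PySem.Int.floordiv_eq_iff_of_pos (by omega)]
          constructor
          · omega
          · omega
        have h0 : PySem.Int.floordiv (((0 : Nat) : Int) + k - 1) k = 0 :=
          floordiv_zero_of_lt k _ (by omega) (by omega)
        rw [h1, h0]; ring
      · have hd : ((s.drop k.toNat).length : Int) = (s.length : Int) - k := by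
          rw [hlen]; omega
        rw [hd]
        have : (s.length : Int) + k - 1 = ((s.length : Int) - k + k - 1) + k := by ring
        rw [this, PySem.Int.floordiv_eq_ediv_of_pos (show (0:Int) < k by omega),
            PySem.Int.floordiv_eq_ediv_of_pos (show (0:Int) < k by omega),
            show ((s.length : Int) - k + k - 1) + k = ((s.length : Int) - k + k - 1) + 1 * k by ring,
            Int.add_mul_ediv_right _ 1 (show k ≠ 0 by omega)]
        ring

-- A's fueled loop computes steps + B's flat-scan result, for any fuel exceeding the list length
lemma loop_eq_bres (k c : Int) (hk : 1 ≤ k) :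
    ∀ (fuel : Nat) (s : List Int) (steps : Int), s.length < fuel →
      max_steps_loop k c fuel s steps = steps + bres k c s := by
  intro fuel
  induction fuel with
  | zero => intro s steps h; omega
  | succ fuel ih =>
    intro s steps h
    by_cases hs : s = []
    · subst hs
      simp [max_steps_loop, bres_nil k c hk]
    · simp only [max_steps_loop, if_neg hs]
      have hsl : PySem.List.slice s none (some k) = s.take k.toNat :=
        PySem.List.slice_to s (by omega)
      have hsr : PySem.List.slice s (some k) none = s.drop k.toNat :=
        PySem.List.slice_from s (by omega)
      rw [hsl, hsr, bres_step k c hk s hs]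
      by_cases hbad : pyChunkBad c (s.take k.toNat) = true
      · rw [if_pos hbad, if_pos hbad]; ring
      · rw [if_neg hbad, if_neg hbad]
        have hdrop : (s.drop k.toNat).length < fuel := by
          have : 1 ≤ k.toNat := by omega
          have hlpos : 0 < s.length := List.length_pos_of_ne_nil hs
          simp only [List.length_drop]
          omega
        rw [ih (s.drop k.toNat) (steps + 1) hdrop]
        ring

-- ===== VERDICT (by name: the statement is the Claim_ definition above) =====
theorem max_steps_spec : Claim_equal_max_steps := by
  intro n k c numbers _ hpre
  unfold Spec_max_steps max_steps max_steps_alt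
  set s := PySem.List.sorted numbers (fun x => x) true with hsdef
  have hlen : s.length = numbers.length := PySem.List.length_sorted numbers _ true
  rcases hpre with hnil | hk
  · subst hnil
    simp [hsdef, PySem.List.sorted, max_steps_loop]
  · rw [loop_eq_bres k c hk (numbers.length + 1) s 0 (by omega)]
    by_cases hs : s = []
    · simp [hs, bres_nil k c hk]
    · rw [if_neg hs]
      simp [bres]
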